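-- pv_equiv track=rewrite | github.com/undef-games/undef-terminal | src/undef/terminal/ansi.py | _handle_tilde_codes
-- ===== SOURCE A (Python) =====
-- _PREVIEW_COLOR_MAP = {
--     "k": 30,
--     "r": 31,
--     "g": 32,
--     "y": 33,
--     "b": 34,
--     "m": 35,
--     "c": 36,
--     "w": 37,
-- }
--
-- _TILDE_MAP: dict[str, tuple[str, str]] = {
--     "1": ("+", "g"),
--     "2": ("+", "w"),
--     "3": ("+", "c"),
--     "4": ("+", "r"),
--     "5": ("+", "m"),
--     "6": ("+", "y"),
--     "7": ("-", "w"),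
--     "0": ("-", "x"),
--     "r": ("+", "r"),
--     "R": ("+", "r"),
--     "g": ("+", "g"),
--     "G": ("+", "g"),
--     "y": ("+", "y"),
--     "Y": ("+", "y"),
--     "b": ("+", "b"),
--     "B": ("+", "b"),
--     "m": ("+", "m"),
--     "M": ("+", "m"),
--     "c": ("+", "c"),
--     "C": ("+", "c"),
--     "w": ("+", "w"),
--     "W": ("+", "w"),
--     "d": ("-", "w"),
--     "D": ("-", "w"),
--     "E": ("+", "r"),
-- }
--
-- def _emit_color(polarity: str, color_char: str) -> str:
--     if color_char == "x":
--         return "\x1b[0m"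
--     code = _PREVIEW_COLOR_MAP.get(color_char)
--     if code is None:
--         return ""
--     if polarity == "+":
--         return f"\x1b[0;1;{code}m"
--     return f"\x1b[0;{code}m"
--
-- def _handle_tilde_codes(text: str) -> str:
--     out = []
--     i = 0
--     while i < len(text):
--         if text[i] == "~" and i + 1 < len(text):
--             code = text[i + 1]
--             if code in _TILDE_MAP:
--                 polarity, color_char = _TILDE_MAP[code]
--                 seq = _emit_color(polarity, color_char)
--                 if seq:  # pragma: no branch
--                     out.append(seq)
--                     i += 2
--                     continue
--         out.append(text[i])
--         i += 1
--     return "".join(out)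
-- ===== SOURCE B (Python) =====
-- # One flat literal table: tilde code -> full ANSI escape sequence.
-- _TILDE_SEQ = {
--     "1": "\x1b[0;1;32m", "2": "\x1b[0;1;37m", "3": "\x1b[0;1;36m",
--     "4": "\x1b[0;1;31m", "5": "\x1b[0;1;35m", "6": "\x1b[0;1;33m",
--     "7": "\x1b[0;37m",   "0": "\x1b[0m",
--     "r": "\x1b[0;1;31m", "R": "\x1b[0;1;31m",
--     "g": "\x1b[0;1;32m", "G": "\x1b[0;1;32m",
--     "y": "\x1b[0;1;33m", "Y": "\x1b[0;1;33m",
--     "b": "\x1b[0;1;34m", "B": "\x1b[0;1;34m",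
--     "m": "\x1b[0;1;35m", "M": "\x1b[0;1;35m",
--     "c": "\x1b[0;1;36m", "C": "\x1b[0;1;36m",
--     "w": "\x1b[0;1;37m", "W": "\x1b[0;1;37m",
--     "d": "\x1b[0;37m",   "D": "\x1b[0;37m",
--     "E": "\x1b[0;1;31m",
-- }
--
-- def _handle_tilde_codes(text):
--     # Split on "~": each segment after the first was preceded by one "~" in
--     # the original text; a segment starting with a known code becomes its
--     # escape sequence, otherwise the "~" is restored literally.
--     parts = text.split("~")
--     pieces = [parts[0]]
--     for seg in parts[1:]:
--         if seg and seg[0] in _TILDE_SEQ: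
--             pieces.append(_TILDE_SEQ[seg[0]] + seg[1:])
--         else:
--             pieces.append("~" + seg)
--     return "".join(pieces)
-- ===== Notes on version B (the rewrite author's own statement) =====
-- stated objective: faster
-- what changed: B replaces A's per-character index loop with its two-level map/_emit_color indirection by one flat literal code-to-escape-sequence table and a bulk rewrite that splits the text on the tilde character and maps each following segment, moving the per-character work into C-level split/join.
import Mathlib
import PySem

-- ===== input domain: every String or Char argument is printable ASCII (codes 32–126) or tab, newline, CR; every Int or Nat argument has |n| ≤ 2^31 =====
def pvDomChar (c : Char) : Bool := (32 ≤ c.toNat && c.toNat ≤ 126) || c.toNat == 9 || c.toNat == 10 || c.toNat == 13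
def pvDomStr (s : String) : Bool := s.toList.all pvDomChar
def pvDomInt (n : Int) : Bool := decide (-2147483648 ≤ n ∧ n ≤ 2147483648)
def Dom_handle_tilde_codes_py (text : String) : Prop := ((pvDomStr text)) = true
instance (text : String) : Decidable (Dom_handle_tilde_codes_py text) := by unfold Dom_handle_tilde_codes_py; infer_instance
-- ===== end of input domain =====

-- B replaces A's per-character index loop with its two-level map/_emit_color indirection by one
-- flat literal code→escape-sequence table and a bulk rewrite that splits the text on '~' and
-- maps each following segment; same O(n), measured faster by a constant factor (bulk split/join).

-- ===== PORT A =====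
def previewColorMap : PySem.Dict Char Int := PySem.Dict.mk
  [('k', 30), ('r', 31), ('g', 32), ('y', 33), ('b', 34), ('m', 35), ('c', 36), ('w', 37)]

def tildeMap : PySem.Dict Char (Char × Char) := PySem.Dict.mk
  [('1', ('+', 'g')), ('2', ('+', 'w')), ('3', ('+', 'c')), ('4', ('+', 'r')),
   ('5', ('+', 'm')), ('6', ('+', 'y')), ('7', ('-', 'w')), ('0', ('-', 'x')),
   ('r', ('+', 'r')), ('R', ('+', 'r')), ('g', ('+', 'g')), ('G', ('+', 'g')),
   ('y', ('+', 'y')), ('Y', ('+', 'y')), ('b', ('+', 'b')), ('B', ('+', 'b')),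
   ('m', ('+', 'm')), ('M', ('+', 'm')), ('c', ('+', 'c')), ('C', ('+', 'c')),
   ('w', ('+', 'w')), ('W', ('+', 'w')), ('d', ('-', 'w')), ('D', ('-', 'w')),
   ('E', ('+', 'r'))]

-- _emit_color; the 1-char Python strings are ported as Char, the returned str as List Char
def emit_color (polarity : Char) (color_char : Char) : List Char :=
  if color_char = 'x' then ['\x1b', '[', '0', 'm']
  else
    match previewColorMap.get? color_char with
    | none => []
    | some code =>
      if polarity = '+' then ['\x1b', '[', '0', ';', '1', ';'] ++ PySem.Int.toChars code ++ ['m']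
      else ['\x1b', '[', '0', ';'] ++ PySem.Int.toChars code ++ ['m']

-- the while loop of _handle_tilde_codes: first argument is text[i:], `out` the pieces list;
-- `text[i] == '~' and i + 1 < len(text)` is the cons-cons pattern, `code = text[i+1]`
def loopA : List Char → List (List Char) → List (List Char)
  | [], out => out
  | [c], out => out ++ [[c]]
  | c :: code :: rest2, out =>
    if c = '~' then
      match tildeMap.get? code with
      | some (pol, col) =>
        let seq := emit_color pol col
        if seq ≠ [] then loopA rest2 (out ++ [seq])
        else loopA (code :: rest2) (out ++ [[c]])
      | none => loopA (code :: rest2) (out ++ [[c]])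
    else loopA (code :: rest2) (out ++ [[c]])
  termination_by l _ => l.length
  decreasing_by all_goals simp

def handle_tilde_codes_py (text : String) : String :=
  String.mk (PySem.Chars.join [] (loopA text.toList []))

-- ===== PORT B =====
-- _TILDE_SEQ: the flat literal table of Source B, code char → full escape sequence
def tildeSeq : PySem.Dict Char (List Char) := PySem.Dict.mk
  [('1', ['\x1b', '[', '0', ';', '1', ';', '3', '2', 'm']),
   ('2', ['\x1b', '[', '0', ';', '1', ';', '3', '7', 'm']),
   ('3', ['\x1b', '[', '0', ';', '1', ';', '3', '6', 'm']),
   ('4', ['\x1b', '[', '0', ';', '1', ';', '3', '1', 'm']),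
   ('5', ['\x1b', '[', '0', ';', '1', ';', '3', '5', 'm']),
   ('6', ['\x1b', '[', '0', ';', '1', ';', '3', '3', 'm']),
   ('7', ['\x1b', '[', '0', ';', '3', '7', 'm']),
   ('0', ['\x1b', '[', '0', 'm']),
   ('r', ['\x1b', '[', '0', ';', '1', ';', '3', '1', 'm']),
   ('R', ['\x1b', '[', '0', ';', '1', ';', '3', '1', 'm']),
   ('g', ['\x1b', '[', '0', ';', '1', ';', '3', '2', 'm']),
   ('G', ['\x1b', '[', '0', ';', '1', ';', '3', '2', 'm']),
   ('y', ['\x1b', '[', '0', ';', '1', ';', '3', '3', 'm']),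
   ('Y', ['\x1b', '[', '0', ';', '1', ';', '3', '3', 'm']),
   ('b', ['\x1b', '[', '0', ';', '1', ';', '3', '4', 'm']),
   ('B', ['\x1b', '[', '0', ';', '1', ';', '3', '4', 'm']),
   ('m', ['\x1b', '[', '0', ';', '1', ';', '3', '5', 'm']),
   ('M', ['\x1b', '[', '0', ';', '1', ';', '3', '5', 'm']),
   ('c', ['\x1b', '[', '0', ';', '1', ';', '3', '6', 'm']),
   ('C', ['\x1b', '[', '0', ';', '1', ';', '3', '6', 'm']),
   ('w', ['\x1b', '[', '0', ';', '1', ';', '3', '7', 'm']),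
   ('W', ['\x1b', '[', '0', ';', '1', ';', '3', '7', 'm']),
   ('d', ['\x1b', '[', '0', ';', '3', '7', 'm']),
   ('D', ['\x1b', '[', '0', ';', '3', '7', 'm']),
   ('E', ['\x1b', '[', '0', ';', '1', ';', '3', '1', 'm'])]

-- loop body of B: one segment following a "~" (`seg and seg[0] in _TILDE_SEQ` + lookup = get?)
def handleSeg (seg : List Char) : List Char :=
  match seg with
  | s0 :: rest =>
    (match tildeSeq.get? s0 with
     | some sq => sq ++ rest
     | none => '~' :: seg)
  | [] => '~' :: seg

def handle_tilde_codes_py_alt (text : String) : String :=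
  let parts := PySem.Chars.splitOn text.toList ['~']
  String.mk (PySem.Chars.join [] (parts.headD [] :: parts.tail.map handleSeg))

-- ===== PRECONDITION & SPEC =====
def Spec_handle_tilde_codes_py (text : String) (out : String) : Prop := out = handle_tilde_codes_py_alt text
instance (text : String) (out : String) : Decidable (Spec_handle_tilde_codes_py text out) := by unfold Spec_handle_tilde_codes_py; infer_instance

-- ===== CLAIM (what is proved, stated in full; the proofs are below) =====
def Claim_equal_handle_tilde_codes_py : Prop := ∀ (text : String), Dom_handle_tilde_codes_py text → Spec_handle_tilde_codes_py text (handle_tilde_codes_py text)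

-- ===== LEMMAS AND PROOFS =====

-- simple recursive model of text.split("~")
def pvSplit : List Char → List (List Char)
  | [] => [[]]
  | c :: r =>
    if c = '~' then [] :: pvSplit r
    else
      match pvSplit r with
      | [] => [[c]]
      | p :: ps => (c :: p) :: ps

-- prepend a prefix onto the first part
def pvPre (p : List Char) : List (List Char) → List (List Char)
  | [] => [p]
  | q :: qs => (p ++ q) :: qs

theorem pvSplit_ne_nil (l : List Char) : pvSplit l ≠ [] := by
  cases l with
  | nil => simp [pvSplit]
  | cons c r =>
    simp only [pvSplit]
    split
    · simp
    · split <;> simp_all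

theorem go_spec (fuel : Nat) : ∀ (l cur : List Char) (acc : List (List Char)),
    l.length < fuel →
    PySem.Chars.splitOn.go ['~'] fuel l cur acc = acc.reverse ++ pvPre cur.reverse (pvSplit l) := by
  induction fuel with
  | zero => intro l cur acc h; omega
  | succ f ih =>
    intro l cur acc h
    cases l with
    | nil => simp [PySem.Chars.splitOn.go, pvSplit, pvPre]
    | cons c r =>
      by_cases hc : c = '~'
      · subst hc
        have hpre : List.isPrefixOf ['~'] ('~' :: r) = true := by simp [List.isPrefixOf]
        rw [PySem.Chars.splitOn.go, if_pos hpre]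
        simp only [List.length_cons] at h
        have hdrop : List.drop (['~'] : List Char).length ('~' :: r) = r := rfl
        rw [hdrop, ih r [] (cur.reverse :: acc) (by omega)]
        cases hs : pvSplit r with
        | nil => exact absurd hs (pvSplit_ne_nil r)
        | cons p ps => simp [pvSplit, pvPre, hs]
      · have hpre : List.isPrefixOf ['~'] (c :: r) = false := by
          simp [List.isPrefixOf]; exact fun h' => hc h'.symm
        rw [PySem.Chars.splitOn.go, if_neg (by simp [hpre])]
        simp only [List.length_cons] at h
        rw [ih r (c :: cur) acc (by omega)]
        cases hs : pvSplit r with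
        | nil => exact absurd hs (pvSplit_ne_nil r)
        | cons p ps => simp [pvSplit, pvPre, hs, hc]

theorem splitOn_eq (l : List Char) : PySem.Chars.splitOn l ['~'] = pvSplit l := by
  rw [PySem.Chars.splitOn, go_spec (l.length + 1) l [] [] (by omega)]
  cases hs : pvSplit l with
  | nil => exact absurd hs (pvSplit_ne_nil l)
  | cons p ps => simp [pvPre]

-- membership in a literal dict from a successful lookup
theorem get?_mem {ν : Type} (l : List (Char × ν)) (k : Char) (v : ν)
    (h : (PySem.Dict.mk l).get? k = some v) : (k, v) ∈ l := by
  simp only [PySem.Dict.get?, Option.map_eq_some_iff] at h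
  obtain ⟨q, hq, hv⟩ := h
  have h1 := List.find?_some hq
  have h2 := List.mem_of_find?_eq_some hq
  obtain ⟨k1, v1⟩ := q
  simp only [beq_iff_eq] at h1
  subst h1; subst hv; exact h2

-- B's literal flat table is exactly the value-mapped two-level table of A
theorem tildeSeq_items :
    tildeSeq.items = tildeMap.items.map (fun kv => (kv.1, emit_color kv.2.1 kv.2.2)) := by
  decide

theorem tildeSeq_get? (d : Char) :
    tildeSeq.get? d = (tildeMap.get? d).map (fun pc => emit_color pc.1 pc.2) := by
  have hcast : tildeSeq.get? d =
      (PySem.Dict.mk (tildeMap.items.map (fun kv => (kv.1, emit_color kv.2.1 kv.2.2)))).get? d := by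
    simp only [PySem.Dict.get?, ← tildeSeq_items]
  rw [hcast]
  simp only [PySem.Dict.get?, List.find?_map, Option.map_map]
  have hp : (fun (p : Char × List Char) => p.1 == d) ∘
      (fun (kv : Char × Char × Char) => (kv.1, emit_color kv.2.1 kv.2.2)) =
      fun (p : Char × Char × Char) => p.1 == d := rfl
  rw [hp]
  rcases List.find? (fun p => p.1 == d) tildeMap.items with _ | q <;> rfl

-- every sequence reachable from the tilde table is non-empty
theorem emit_ne_nil (d : Char) (pc : Char × Char) (h : tildeMap.get? d = some pc) :
    emit_color pc.1 pc.2 ≠ [] := by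
  have hm : (d, pc) ∈ tildeMap.items := get?_mem _ _ _ h
  have hall : tildeMap.items.all (fun kv => !(emit_color kv.2.1 kv.2.2).isEmpty) = true := by decide
  rw [List.all_eq_true] at hall
  have := hall _ hm
  simpa [List.isEmpty_iff] using this

theorem get?_tilde_none : tildeMap.get? '~' = none := by decide

-- A's loop with empty accumulator, flattened
def pvA (l : List Char) : List Char := (loopA l []).flatten

theorem loopA_acc (n : Nat) : ∀ (l : List Char), l.length ≤ n →
    ∀ out, loopA l out = out ++ loopA l [] := by
  induction n with
  | zero =>
    intro l hl out
    have : l = [] := by cases l <;> simp_all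
    subst this; simp [loopA]
  | succ n ih =>
    intro l hl out
    match l with
    | [] => simp [loopA]
    | [c] => simp [loopA]
    | c :: d :: r =>
      simp only [List.length_cons] at hl
      by_cases hc : c = '~'
      · rcases hg : tildeMap.get? d with _ | ⟨pol, col⟩
        · rw [loopA, if_pos hc]; rw [loopA, if_pos hc]
          simp only [hg]
          rw [ih (d :: r) (by simp; omega) (out ++ [[c]]),
              ih (d :: r) (by simp; omega) ([] ++ [[c]])]
          simp
        · by_cases hs : emit_color pol col = []
          · rw [loopA, if_pos hc]; rw [loopA, if_pos hc]
            simp only [hg, hs, ne_eq, not_true_eq_false, if_false]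
            rw [ih (d :: r) (by simp; omega) (out ++ [[c]]),
                ih (d :: r) (by simp; omega) ([] ++ [[c]])]
            simp
          · rw [loopA, if_pos hc]; rw [loopA, if_pos hc]
            simp only [hg, ne_eq, hs, not_false_eq_true, if_true]
            rw [ih r (by omega) (out ++ [emit_color pol col]),
                ih r (by omega) ([] ++ [emit_color pol col])]
            simp
      · rw [loopA, if_neg hc]; rw [loopA, if_neg hc]
        rw [ih (d :: r) (by simp; omega) (out ++ [[c]]),
            ih (d :: r) (by simp; omega) ([] ++ [[c]])]
        simp

theorem pvA_nil : pvA [] = [] := by simp [pvA, loopA]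

theorem pvA_cons (c : Char) (r : List Char) (hc : c ≠ '~') : pvA (c :: r) = c :: pvA r := by
  match r with
  | [] => simp [pvA, loopA]
  | d :: r' =>
    unfold pvA
    rw [loopA, if_neg hc, loopA_acc (d :: r').length (d :: r') le_rfl ([] ++ [[c]])]
    simp

theorem pvA_tilde_nil : pvA ['~'] = ['~'] := by simp [pvA, loopA]

theorem pvA_hit (d : Char) (r : List Char) (pc : Char × Char) (h : tildeMap.get? d = some pc) :
    pvA ('~' :: d :: r) = emit_color pc.1 pc.2 ++ pvA r := by
  unfold pvA
  rw [loopA, if_pos rfl]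
  simp only [h, ne_eq, emit_ne_nil d pc h, not_false_eq_true, if_true]
  rw [loopA_acc r.length r le_rfl ([] ++ [emit_color pc.1 pc.2])]
  simp

theorem pvA_miss (d : Char) (r : List Char) (h : tildeMap.get? d = none) :
    pvA ('~' :: d :: r) = '~' :: pvA (d :: r) := by
  unfold pvA
  rw [loopA, if_pos rfl]
  simp only [h]
  rw [loopA_acc (d :: r).length (d :: r) le_rfl ([] ++ [['~']])]
  simp

-- B's result at the flatten level
def pvB (l : List Char) : List Char :=
  (pvSplit l).headD [] ++ ((pvSplit l).tail.map handleSeg).flatten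

def pvB2 (l : List Char) : List Char := ((pvSplit l).map handleSeg).flatten

theorem main_lemma (n : Nat) : ∀ (l : List Char), l.length = n →
    pvA l = pvB l ∧ pvA ('~' :: l) = pvB2 l := by
  induction n using Nat.strong_induction_on with
  | _ n ih =>
    intro l hn
    have h1 : pvA l = pvB l := by
      match l with
      | [] => simp [pvA_nil, pvB, pvSplit]
      | '~' :: r =>
        have hr := (ih r.length (by simp [← hn]) r rfl).2
        simp only [pvB, pvSplit, if_pos rfl, List.headD_cons, List.tail_cons, List.nil_append]
        exact hr.trans rfl
      | c :: r =>
        by_cases hc : c = '~'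
        · subst hc
          have hr := (ih r.length (by simp [← hn]) r rfl).2
          simp only [pvB, pvSplit, if_pos rfl, List.headD_cons, List.tail_cons, List.nil_append]
          exact hr.trans rfl
        · have hr := (ih r.length (by simp [← hn]) r rfl).1
          rw [pvA_cons c r hc, hr]
          simp only [pvB, pvSplit, if_neg hc]
          cases hs : pvSplit r with
          | nil => exact absurd hs (pvSplit_ne_nil r)
          | cons p ps => simp [hs]
    refine ⟨h1, ?_⟩
    match l with
    | [] => simp [pvA_tilde_nil, pvB2, pvSplit, handleSeg]
    | d :: r =>
      by_cases hd : d = '~'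
      · subst hd
        have hr := (ih r.length (by simp [← hn]) r rfl).2
        rw [pvA_miss '~' r get?_tilde_none, hr]
        simp [pvB2, pvSplit, handleSeg, tildeSeq_get?, get?_tilde_none]
      · rcases hg : tildeMap.get? d with _ | pc
        · rw [pvA_miss d r hg, h1]
          simp only [pvB, pvB2, pvSplit, if_neg hd]
          cases hs : pvSplit r with
          | nil => exact absurd hs (pvSplit_ne_nil r)
          | cons p ps => simp [handleSeg, tildeSeq_get?, hg]
        · rw [pvA_hit d r pc hg]
          have hr := (ih r.length (by simp [← hn]) r rfl).1
          rw [hr]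
          simp only [pvB, pvB2, pvSplit, if_neg hd]
          cases hs : pvSplit r with
          | nil => exact absurd hs (pvSplit_ne_nil r)
          | cons p ps => simp [hs, handleSeg, tildeSeq_get?, hg]

theorem join_nil_flatten (ps : List (List Char)) : PySem.Chars.join [] ps = ps.flatten := by
  induction ps with
  | nil => rfl
  | cons p ps ih =>
    cases ps with
    | nil => simp [PySem.Chars.join, List.intercalate]
    | cons q qs =>
      simp only [PySem.Chars.join, List.intercalate] at ih ⊢
      simp [List.intersperse] at ih ⊢
      simpa using ih

-- ===== VERDICT (by name: the statement is the Claim_ definition above) =====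
theorem handle_tilde_codes_py_spec : Claim_equal_handle_tilde_codes_py := by
  unfold Claim_equal_handle_tilde_codes_py
  intro text _
  unfold Spec_handle_tilde_codes_py handle_tilde_codes_py handle_tilde_codes_py_alt
  simp only [splitOn_eq, join_nil_flatten]
  have h := (main_lemma text.toList.length text.toList rfl).1
  unfold pvA pvB at h
  rw [h]
  cases hs : pvSplit text.toList with
  | nil => exact absurd hs (pvSplit_ne_nil _)
  | cons p ps => simp [hs]
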